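-- pv_equiv track=rewrite | github.com/bpiegu/epic | epic/utils/find_readlength.py | get_closest_readlength
-- ===== SOURCE A (Python) =====
-- def get_closest_readlength(estimated_readlength):
--     # type: (int) -> int
--     """Find the predefined readlength closest to the estimated readlength.
--
--     In the case of a tie, choose the shortest readlength."""
--
--     readlengths = [36, 50, 75, 100]
--     differences = [abs(r - estimated_readlength) for r in readlengths]
--     min_difference = min(differences)
--     index_of_min_difference = [i
--                                for i, d in enumerate(differences)
--                                if d == min_difference][0]
--
--     return readlengths[index_of_min_difference]
-- ===== SOURCE B (Python) =====
-- def get_closest_readlength(estimated_readlength):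
--     """Threshold cascade over the midpoints of [36, 50, 75, 100]."""
--     if estimated_readlength <= 43:
--         return 36
--     elif estimated_readlength <= 62:
--         return 50
--     elif estimated_readlength <= 87:
--         return 75
--     else:
--         return 100
-- ===== Notes on version B (the rewrite author's own statement) =====
-- stated objective: simpler
-- what changed: Replaces the difference-list/argmin scan with a closed-form midpoint threshold cascade (<=43 -> 36, <=62 -> 50, <=87 -> 75, else 100), matching A's tie-toward-shorter.
import Mathlib
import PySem

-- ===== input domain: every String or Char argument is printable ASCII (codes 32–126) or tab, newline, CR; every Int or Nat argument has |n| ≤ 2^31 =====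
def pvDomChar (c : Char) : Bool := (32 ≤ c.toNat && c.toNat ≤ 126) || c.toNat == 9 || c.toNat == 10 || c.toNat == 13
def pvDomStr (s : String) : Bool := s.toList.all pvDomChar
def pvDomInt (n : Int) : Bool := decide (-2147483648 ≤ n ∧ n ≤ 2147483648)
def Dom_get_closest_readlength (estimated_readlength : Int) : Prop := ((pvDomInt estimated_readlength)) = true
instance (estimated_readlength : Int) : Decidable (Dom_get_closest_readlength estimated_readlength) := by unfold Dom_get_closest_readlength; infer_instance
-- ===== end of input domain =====

-- B replaces A's difference-list/argmin scan with a midpoint threshold cascade (simpler, same results).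


-- ===== PORT A =====
def get_closest_readlength (estimated_readlength : Int) : Int :=
  let readlengths : List Int := [36, 50, 75, 100]
  let differences : List Int := readlengths.map (fun r => |r - estimated_readlength|)
  match PySem.List.min? differences (fun d => d) with
  | none => 0  -- unreachable: differences is nonempty (min([]) would raise in Python)
  | some min_difference =>
    let idxs : List Int :=
      ((PySem.List.enumerate differences).filter (fun p => p.2 == min_difference)).map (fun p => p.1)
    match PySem.List.pyGet? idxs 0 with
    | none => 0  -- unreachable: min_difference occurs in differences
    | some index_of_min_difference =>
      match PySem.List.pyGet? readlengths index_of_min_difference with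
      | none => 0  -- unreachable: index is in range
      | some r => r

-- ===== PORT B =====
def get_closest_readlength_alt (estimated_readlength : Int) : Int :=
  if estimated_readlength ≤ 43 then 36
  else if estimated_readlength ≤ 62 then 50
  else if estimated_readlength ≤ 87 then 75
  else 100

-- ===== PRECONDITION & SPEC =====
def Spec_get_closest_readlength (estimated_readlength : Int) (out : Int) : Prop := out = get_closest_readlength_alt estimated_readlength
instance (estimated_readlength : Int) (out : Int) : Decidable (Spec_get_closest_readlength estimated_readlength out) := by unfold Spec_get_closest_readlength; infer_instance

-- ===== CLAIM (what is proved, stated in full; the proofs are below) =====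
def Claim_equal_get_closest_readlength : Prop := ∀ (estimated_readlength : Int), Dom_get_closest_readlength estimated_readlength → Spec_get_closest_readlength estimated_readlength (get_closest_readlength estimated_readlength)

-- ===== LEMMAS AND PROOFS =====

theorem get_closest_eq_cascade (e : Int) :
    get_closest_readlength e = get_closest_readlength_alt e := by
  unfold get_closest_readlength get_closest_readlength_alt
  simp only [List.map, PySem.List.enumerate_cons, PySem.List.enumerate_nil,
    PySem.List.min?_id_cons, List.foldl, List.filter, List.map]
  rcases le_or_gt e 43 with h1 | h1
  · have hm : min |36 - e| (min |50 - e| (min |75 - e| |100 - e|)) = |36 - e| := by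
      simp only [Int.abs_eq_natAbs, min_def]; split_ifs <;> omega
    simp [hm, PySem.List.pyGet?, PySem.List.pyIdx?]
    omega
  · rcases le_or_gt e 62 with h2 | h2
    · have hm : min |36 - e| (min |50 - e| (min |75 - e| |100 - e|)) = |50 - e| := by
        simp only [Int.abs_eq_natAbs, min_def]; split_ifs <;> omega
      have h0 : (|36 - e| == |50 - e|) = false := by
        simp only [beq_eq_false_iff_ne, ne_eq, Int.abs_eq_natAbs]; omega
      simp [hm, h0, PySem.List.pyGet?, PySem.List.pyIdx?]
      omega
    · rcases le_or_gt e 87 with h3 | h3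
      · have hm : min |36 - e| (min |50 - e| (min |75 - e| |100 - e|)) = |75 - e| := by
          simp only [Int.abs_eq_natAbs, min_def]; split_ifs <;> omega
        have h0 : (|36 - e| == |75 - e|) = false := by
          simp only [beq_eq_false_iff_ne, ne_eq, Int.abs_eq_natAbs]; omega
        have h1' : (|50 - e| == |75 - e|) = false := by
          simp only [beq_eq_false_iff_ne, ne_eq, Int.abs_eq_natAbs]; omega
        simp [hm, h0, h1', PySem.List.pyGet?, PySem.List.pyIdx?]
        omega
      · have hm : min |36 - e| (min |50 - e| (min |75 - e| |100 - e|)) = |100 - e| := by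
          simp only [Int.abs_eq_natAbs, min_def]; split_ifs <;> omega
        have h0 : (|36 - e| == |100 - e|) = false := by
          simp only [beq_eq_false_iff_ne, ne_eq, Int.abs_eq_natAbs]; omega
        have h1' : (|50 - e| == |100 - e|) = false := by
          simp only [beq_eq_false_iff_ne, ne_eq, Int.abs_eq_natAbs]; omega
        have h2' : (|75 - e| == |100 - e|) = false := by
          simp only [beq_eq_false_iff_ne, ne_eq, Int.abs_eq_natAbs]; omega
        simp [hm, h0, h1', h2', PySem.List.pyGet?, PySem.List.pyIdx?]
        omega

-- ===== VERDICT (by name: the statement is the Claim_ definition above) =====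
theorem get_closest_readlength_spec : Claim_equal_get_closest_readlength := by
  intro e _
  exact get_closest_eq_cascade e
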